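-- pv_equiv track=rewrite | github.com/poxiaoyun/docs | scripts/phase2-account.py | remove_component_names
-- ===== SOURCE A (Python) =====
-- def remove_component_names(content):
--     """Replace React component names with user-facing descriptions."""
--     # In Mermaid diagrams, replace component names
--     replacements = {
--         'TenantInfo': '租户信息',
--         'MemberStats': '成员统计',
--         'MembersTable': '成员列表',
--         'TenantQuota': '租户配额',
--         'TenantWorkspaces': '工作空间列表',
--         'TenantEvents': '操作日志',
--         'UploadAvatarWithCrop': '上传并裁剪头像',
--     }
--     for old, new in replacements.items():
--         content = content.replace(old, new)
--     return content
-- ===== SOURCE B (Python) =====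
-- def remove_component_names(content):
--     """Replace React component names with user-facing descriptions (single left-to-right pass)."""
--     table = (('TenantInfo', '租户信息'), ('MemberStats', '成员统计'),
--              ('MembersTable', '成员列表'), ('TenantQuota', '租户配额'),
--              ('TenantWorkspaces', '工作空间列表'), ('TenantEvents', '操作日志'),
--              ('UploadAvatarWithCrop', '上传并裁剪头像'))
--     out = []
--     i = 0
--     n = len(content)
--     while i < n:
--         for old, new in table:
--             if content.startswith(old, i):
--                 out.append(new)
--                 i += len(old)
--                 break
--         else:
--             out.append(content[i])
--             i += 1
--     return ''.join(out)
-- ===== Notes on version B (the rewrite author's own statement) =====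
-- stated objective: alternative
-- what changed: Instead of seven sequential whole-string str.replace passes (one per component name), B makes a single left-to-right pass over the content, at each position emitting the translation of the first matching key (keys are non-overlapping) or copying the character.
import Mathlib
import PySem

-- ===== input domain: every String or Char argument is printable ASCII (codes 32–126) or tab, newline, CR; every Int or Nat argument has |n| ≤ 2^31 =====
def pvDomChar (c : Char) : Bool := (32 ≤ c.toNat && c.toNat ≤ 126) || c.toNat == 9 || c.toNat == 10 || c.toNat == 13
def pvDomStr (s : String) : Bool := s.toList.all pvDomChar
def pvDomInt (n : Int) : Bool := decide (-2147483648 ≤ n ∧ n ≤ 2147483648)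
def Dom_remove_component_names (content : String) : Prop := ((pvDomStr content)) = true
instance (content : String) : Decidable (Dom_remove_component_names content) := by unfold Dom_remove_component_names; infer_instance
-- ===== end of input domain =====

-- B replaces A's seven sequential whole-string replace passes by a single left-to-right
-- scan that substitutes the first matching component name at each position (alternative
-- decomposition, same exact output; the keys never overlap).


-- ===== PORT A =====
-- the literal replacements dict, in insertion order
def pvPairs : List (String × String) :=
  [("TenantInfo", "租户信息"),
   ("MemberStats", "成员统计"),
   ("MembersTable", "成员列表"),
   ("TenantQuota", "租户配额"),
   ("TenantWorkspaces", "工作空间列表"),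
   ("TenantEvents", "操作日志"),
   ("UploadAvatarWithCrop", "上传并裁剪头像")]

-- for old, new in replacements.items(): content = content.replace(old, new)
def remove_component_names (content : String) : String :=
  pvPairs.foldl (fun acc p => PySem.Str.replace acc p.1 p.2) content

-- ===== PORT B =====
-- the keys and values of Source B's dict, as char lists
def pvK1 : List Char := "TenantInfo".toList
def pvK2 : List Char := "MemberStats".toList
def pvK3 : List Char := "MembersTable".toList
def pvK4 : List Char := "TenantQuota".toList
def pvK5 : List Char := "TenantWorkspaces".toList
def pvK6 : List Char := "TenantEvents".toList
def pvK7 : List Char := "UploadAvatarWithCrop".toList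
def pvV1 : List Char := "租户信息".toList
def pvV2 : List Char := "成员统计".toList
def pvV3 : List Char := "成员列表".toList
def pvV4 : List Char := "租户配额".toList
def pvV5 : List Char := "工作空间列表".toList
def pvV6 : List Char := "操作日志".toList
def pvV7 : List Char := "上传并裁剪头像".toList

-- Source B's inner for-loop with break: first key of the dict matching at the current
-- position, with its value and its length (None when none matches)
def pvFirstRep (l : List Char) : Option (List Char × Nat) :=
  if pvK1.isPrefixOf l then some (pvV1, 10)
  else if pvK2.isPrefixOf l then some (pvV2, 11)
  else if pvK3.isPrefixOf l then some (pvV3, 12)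
  else if pvK4.isPrefixOf l then some (pvV4, 11)
  else if pvK5.isPrefixOf l then some (pvV5, 16)
  else if pvK6.isPrefixOf l then some (pvV6, 12)
  else if pvK7.isPrefixOf l then some (pvV7, 20)
  else none

-- Source B's while-loop: one left-to-right pass; on a match emit the value and advance by
-- the key's length, else copy one character
def pvScan : List Char → List Char
  | [] => []
  | c :: t =>
    match pvFirstRep (c :: t) with
    | some (v, n) => v ++ pvScan (t.drop (n - 1))
    | none => c :: pvScan t
termination_by l => l.length
decreasing_by
  · simp only [List.length_cons, List.length_drop]; omega
  · simp only [List.length_cons]; omega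

def remove_component_names_alt (content : String) : String :=
  String.ofList (pvScan content.toList)

-- ===== PRECONDITION & SPEC =====
def Spec_remove_component_names (content : String) (out : String) : Prop := out = remove_component_names_alt content
instance (content : String) (out : String) : Decidable (Spec_remove_component_names content out) := by unfold Spec_remove_component_names; infer_instance

-- ===== CLAIM (what is proved, stated in full; the proofs are below) =====
def Claim_equal_remove_component_names : Prop := ∀ (content : String), Dom_remove_component_names content → Spec_remove_component_names content (remove_component_names content)

-- ===== LEMMAS AND PROOFS =====

-- fuel-free reformulation of Python str.replace (= PySem.Chars.replace) for a nonempty key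
def repS (a : Char) (k v : List Char) : List Char → List Char
  | [] => []
  | c :: t =>
    if (a :: k).isPrefixOf (c :: t) then v ++ repS a k v (t.drop k.length)
    else c :: repS a k v t
termination_by l => l.length
decreasing_by
  · simp only [List.length_cons, List.length_drop]; omega
  · simp only [List.length_cons]; omega

def rep1 (kk v : List Char) (s : List Char) : List Char :=
  match kk with
  | [] => s
  | a :: k => repS a k v s

-- the composition A computes, at char-list level, in dict order (innermost first)
def chainA (s : List Char) : List Char :=
  rep1 pvK7 pvV7 (rep1 pvK6 pvV6 (rep1 pvK5 pvV5 (rep1 pvK4 pvV4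
    (rep1 pvK3 pvV3 (rep1 pvK2 pvV2 (rep1 pvK1 pvV1 s))))))

lemma repS_cons_pos (a : Char) (k v : List Char) (c : Char) (t : List Char)
    (h : (a :: k) <+: (c :: t)) :
    repS a k v (c :: t) = v ++ repS a k v (t.drop k.length) := by
  rw [repS]; simp [List.isPrefixOf_iff_prefix.2 h]

lemma repS_cons_neg (a : Char) (k v : List Char) (c : Char) (t : List Char)
    (h : ¬ (a :: k) <+: (c :: t)) :
    repS a k v (c :: t) = c :: repS a k v t := by
  rw [repS]
  have : (a :: k).isPrefixOf (c :: t) = false := by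
    rw [Bool.eq_false_iff]; intro hb; exact h (List.isPrefixOf_iff_prefix.1 hb)
  simp [this]

lemma go_eq (a : Char) (k v : List Char) :
    ∀ (fuel : Nat) (l acc : List Char), l.length ≤ fuel →
      PySem.Chars.replace.go (a :: k) v fuel l acc = acc.reverse ++ repS a k v l := by
  intro fuel
  induction fuel with
  | zero =>
    intro l acc h
    have hl : l = [] := List.eq_nil_of_length_eq_zero (Nat.le_zero.1 h)
    subst hl
    simp [PySem.Chars.replace.go, repS]
  | succ fuel ih =>
    intro l acc h
    cases l with
    | nil => simp [PySem.Chars.replace.go, repS]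
    | cons c t =>
      by_cases hp : (a :: k).isPrefixOf (c :: t) = true
      · have hpre : (a :: k) <+: (c :: t) := List.isPrefixOf_iff_prefix.1 hp
        rw [PySem.Chars.replace.go]
        simp only [hp, if_true]
        have hlen : (List.drop (a :: k).length (c :: t)).length ≤ fuel := by
          simp only [List.length_cons, List.length_drop] at *
          omega
        rw [ih _ _ hlen, repS_cons_pos a k v c t hpre]
        simp [List.drop_succ_cons]
      · have hnp : ¬ (a :: k) <+: (c :: t) := fun hc => hp (List.isPrefixOf_iff_prefix.2 hc)
        rw [PySem.Chars.replace.go]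
        simp only [hp]
        have hlen : t.length ≤ fuel := by simp only [List.length_cons] at h; omega
        rw [ih _ _ hlen, repS_cons_neg a k v c t hnp]
        simp

lemma replace_eq_rep1 (kk v : List Char) (hk : kk ≠ []) (s : List Char) :
    PySem.Chars.replace s kk v = rep1 kk v s := by
  cases kk with
  | nil => exact absurd rfl hk
  | cons a k =>
    rw [PySem.Chars.replace]
    simp only [List.isEmpty_cons, if_false, Bool.false_eq_true]
    exact go_eq a k v s.length s [] le_rfl

-- neither k nor any window of x starting inside x is a prefix of the other
def noHitB (k x : List Char) : Bool :=
  (List.range x.length).all (fun t => !((x.drop t).isPrefixOf k) && !(k.isPrefixOf (x.drop t)))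

lemma noHit_spec {k x : List Char} (h : noHitB k x = true) :
    ∀ t, t < x.length → ¬ (x.drop t <+: k) ∧ ¬ (k <+: x.drop t) := by
  intro t ht
  have := List.all_eq_true.1 h t (List.mem_range.2 ht)
  simp only [Bool.and_eq_true, Bool.not_eq_true', Bool.eq_false_iff] at this
  exact ⟨fun hc => this.1 (List.isPrefixOf_iff_prefix.2 hc),
         fun hc => this.2 (List.isPrefixOf_iff_prefix.2 hc)⟩

lemma not_prefix_window (k w : List Char) (hw : ¬ w <+: k) (hk : ¬ k <+: w) (X : List Char) :
    ¬ k <+: w ++ X := by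
  intro h
  rcases Nat.lt_or_ge w.length k.length with hlt | hge
  · exact hw (List.prefix_of_prefix_length_le (List.prefix_append w X) h (Nat.le_of_lt hlt))
  · exact hk (List.prefix_of_prefix_length_le h (List.prefix_append w X) hge)

lemma rep1_skip (kk v x : List Char) (hk : kk ≠ []) (h : noHitB kk x = true) :
    ∀ X, rep1 kk v (x ++ X) = x ++ rep1 kk v X := by
  cases kk with
  | nil => exact absurd rfl hk
  | cons a k =>
    simp only [rep1]
    induction x with
    | nil => simp
    | cons c x' ih =>
      intro X
      have h0 := noHit_spec h 0 (by simp)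
      simp only [List.drop_zero] at h0
      have hnp : ¬ (a :: k) <+: (c :: (x' ++ X)) := by
        have := not_prefix_window (a :: k) (c :: x') h0.1 h0.2 X
        simpa using this
      have h' : noHitB (a :: k) x' = true := by
        apply List.all_eq_true.2
        intro t htm
        have ht := List.mem_range.1 htm
        have := List.all_eq_true.1 h (t + 1) (by simp only [List.mem_range, List.length_cons]; omega)
        simpa using this
      simp only [List.cons_append]
      rw [repS_cons_neg a k v c (x' ++ X) hnp, ih h' X]

lemma rep1_head (kk v : List Char) (hk : kk ≠ []) (X : List Char) :
    rep1 kk v (kk ++ X) = v ++ rep1 kk v X := by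
  cases kk with
  | nil => exact absurd rfl hk
  | cons a k =>
    show repS a k v (a :: (k ++ X)) = v ++ repS a k v X
    rw [repS_cons_pos a k v a (k ++ X) (List.prefix_append (a :: k) X)]
    rw [List.drop_left' rfl]

lemma rep1_cons_neg (kk v : List Char) (c : Char) (t : List Char) (hk : kk ≠ [])
    (h : ¬ kk <+: (c :: t)) : rep1 kk v (c :: t) = c :: rep1 kk v t := by
  cases kk with
  | nil => exact absurd rfl hk
  | cons a k => exact repS_cons_neg a k v c t h

lemma repS_structure (a : Char) (k v : List Char) :
    ∀ s, repS a k v s = s ∨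
      ∃ p Z, p ≤ s.length ∧ repS a k v s = s.take p ++ v ++ Z := by
  intro s
  induction hn : s.length using Nat.strong_induction_on generalizing s with
  | _ n ih =>
    cases s with
    | nil => left; rw [repS]
    | cons c t =>
      by_cases hp : (a :: k) <+: (c :: t)
      · right
        refine ⟨0, repS a k v (t.drop k.length), Nat.zero_le _, ?_⟩
        rw [repS_cons_pos a k v c t hp]; simp
      · rw [repS_cons_neg a k v c t hp]
        rcases ih t.length (by have h' := hn; simp only [List.length_cons] at h'; omega) t rfl with heq | ⟨p, Z, hple, heq⟩
        · left; rw [heq]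
        · right
          refine ⟨p + 1, Z, by have h' := hn; simp only [List.length_cons] at h'; omega, ?_⟩
          rw [heq]; simp

lemma rep1_nil (kk v : List Char) : rep1 kk v [] = [] := by
  cases kk with
  | nil => rfl
  | cons a k => show repS a k v [] = []; rw [repS]

lemma not_prefix_cons_rep1 (k' kk v : List Char) (c : Char) (Y : List Char)
    (hA : k'.all (fun ch => ch.toNat < 128) = true)
    (hvne : v ≠ []) (hvh : 128 ≤ (v.headD ' ').toNat)
    (h1 : ¬ k' <+: c :: Y) : ¬ k' <+: c :: rep1 kk v Y := by
  cases kk with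
  | nil => exact h1
  | cons a k =>
    show ¬ k' <+: c :: repS a k v Y
    intro h
    rcases repS_structure a k v Y with heq | ⟨p, Z, hple, heq⟩
    · rw [heq] at h; exact h1 h
    · rw [heq] at h
      cases v with
      | nil => exact absurd rfl hvne
      | cons vh vt =>
        rcases Nat.lt_or_ge (p + 1) k'.length with hlt | hle
        case inr =>
          have hpre1 : (c :: Y.take p) <+: (c :: (Y.take p ++ (vh :: vt) ++ Z)) := by
            simp only [List.cons_prefix_cons, List.append_assoc]
            exact ⟨trivial, List.prefix_append _ _⟩
          have hlen : k'.length ≤ (c :: Y.take p).length := by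
            simp only [List.length_cons, List.length_take]
            omega
          have hk' : k' <+: c :: Y.take p :=
            List.prefix_of_prefix_length_le h hpre1 hlen
          have : (c :: Y.take p) <+: c :: Y := by
            simp only [List.cons_prefix_cons]
            exact ⟨trivial, List.take_prefix p Y⟩
          exact h1 (hk'.trans this)
        · have hget := h.getElem (i := p + 1) hlt
          have htlen : (Y.take p).length = p := by
            simp only [List.length_take]; omega
          simp only [List.append_assoc, List.getElem_cons_succ] at hget
          rw [List.getElem_append_right (le_of_eq htlen)] at hget
          simp only [htlen, Nat.sub_self, List.cons_append, List.getElem_cons_zero] at hget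
          have hch : k'[p + 1].toNat < 128 := by
            have := List.all_eq_true.1 hA _ (List.getElem_mem hlt)
            simpa using this
          rw [hget] at hch
          simp only [List.headD_cons] at hvh
          omega

-- B's single pass equals A's composition of the seven replaces
set_option maxRecDepth 8192 in
lemma scan_eq_chain : ∀ (n : Nat) (s : List Char), s.length ≤ n → pvScan s = chainA s := by
  intro n
  induction n with
  | zero =>
    intro s h
    have hs : s = [] := List.eq_nil_of_length_eq_zero (Nat.le_zero.1 h)
    subst hs
    simp only [pvScan, chainA, rep1_nil]
  | succ n ih =>
    intro s h
    cases s with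
    | nil => simp only [pvScan, chainA, rep1_nil]
    | cons c t =>
      by_cases h1 : pvK1 <+: (c :: t)
      · obtain ⟨r, hr⟩ := h1
        have hlen : pvK1.length + r.length = t.length + 1 := by
          have := congrArg List.length hr; simpa using this
        have hdrop : t.drop 9 = r := by
          have hd : (pvK1 ++ r).drop 10 = r := List.drop_left' (by decide)
          rw [hr] at hd
          simpa [List.drop_succ_cons] using hd
        have hB : pvScan (c :: t) = pvV1 ++ pvScan r := by
          rw [pvScan]
          have hF : pvFirstRep (c :: t) = some (pvV1, 10) := by
            rw [pvFirstRep, if_pos (List.isPrefixOf_iff_prefix.2 ⟨r, hr⟩)]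
          rw [hF]
          simp [hdrop]
        rw [hB, chainA, ← hr]
        rw [rep1_head pvK1 pvV1 (by decide)]
        rw [rep1_skip pvK2 pvV2 pvV1 (by decide) (by decide)]
        rw [rep1_skip pvK3 pvV3 pvV1 (by decide) (by decide)]
        rw [rep1_skip pvK4 pvV4 pvV1 (by decide) (by decide)]
        rw [rep1_skip pvK5 pvV5 pvV1 (by decide) (by decide)]
        rw [rep1_skip pvK6 pvV6 pvV1 (by decide) (by decide)]
        rw [rep1_skip pvK7 pvV7 pvV1 (by decide) (by decide)]
        rw [ih r (by
          have hL : pvK1.length = 10 := by decide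
          have hc : (c :: t).length = t.length + 1 := by simp
          omega)]
        rfl
      ·
        by_cases h2 : pvK2 <+: (c :: t)
        · obtain ⟨r, hr⟩ := h2
          have hlen : pvK2.length + r.length = t.length + 1 := by
            have := congrArg List.length hr; simpa using this
          have hdrop : t.drop 10 = r := by
            have hd : (pvK2 ++ r).drop 11 = r := List.drop_left' (by decide)
            rw [hr] at hd
            simpa [List.drop_succ_cons] using hd
          have hB : pvScan (c :: t) = pvV2 ++ pvScan r := by
            rw [pvScan]
            have hF : pvFirstRep (c :: t) = some (pvV2, 11) := by
              rw [pvFirstRep,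
                if_neg (fun hb => h1 (List.isPrefixOf_iff_prefix.1 hb)),
                if_pos (List.isPrefixOf_iff_prefix.2 ⟨r, hr⟩)]
            rw [hF]
            simp [hdrop]
          rw [hB, chainA, ← hr]
          rw [rep1_skip pvK1 pvV1 pvK2 (by decide) (by decide)]
          rw [rep1_head pvK2 pvV2 (by decide)]
          rw [rep1_skip pvK3 pvV3 pvV2 (by decide) (by decide)]
          rw [rep1_skip pvK4 pvV4 pvV2 (by decide) (by decide)]
          rw [rep1_skip pvK5 pvV5 pvV2 (by decide) (by decide)]
          rw [rep1_skip pvK6 pvV6 pvV2 (by decide) (by decide)]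
          rw [rep1_skip pvK7 pvV7 pvV2 (by decide) (by decide)]
          rw [ih r (by
            have hL : pvK2.length = 11 := by decide
            have hc : (c :: t).length = t.length + 1 := by simp
            omega)]
          rfl
        ·
          by_cases h3 : pvK3 <+: (c :: t)
          · obtain ⟨r, hr⟩ := h3
            have hlen : pvK3.length + r.length = t.length + 1 := by
              have := congrArg List.length hr; simpa using this
            have hdrop : t.drop 11 = r := by
              have hd : (pvK3 ++ r).drop 12 = r := List.drop_left' (by decide)
              rw [hr] at hd
              simpa [List.drop_succ_cons] using hd
            have hB : pvScan (c :: t) = pvV3 ++ pvScan r := by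
              rw [pvScan]
              have hF : pvFirstRep (c :: t) = some (pvV3, 12) := by
                rw [pvFirstRep,
                  if_neg (fun hb => h1 (List.isPrefixOf_iff_prefix.1 hb)),
                  if_neg (fun hb => h2 (List.isPrefixOf_iff_prefix.1 hb)),
                  if_pos (List.isPrefixOf_iff_prefix.2 ⟨r, hr⟩)]
              rw [hF]
              simp [hdrop]
            rw [hB, chainA, ← hr]
            rw [rep1_skip pvK1 pvV1 pvK3 (by decide) (by decide)]
            rw [rep1_skip pvK2 pvV2 pvK3 (by decide) (by decide)]
            rw [rep1_head pvK3 pvV3 (by decide)]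
            rw [rep1_skip pvK4 pvV4 pvV3 (by decide) (by decide)]
            rw [rep1_skip pvK5 pvV5 pvV3 (by decide) (by decide)]
            rw [rep1_skip pvK6 pvV6 pvV3 (by decide) (by decide)]
            rw [rep1_skip pvK7 pvV7 pvV3 (by decide) (by decide)]
            rw [ih r (by
              have hL : pvK3.length = 12 := by decide
              have hc : (c :: t).length = t.length + 1 := by simp
              omega)]
            rfl
          ·
            by_cases h4 : pvK4 <+: (c :: t)
            · obtain ⟨r, hr⟩ := h4
              have hlen : pvK4.length + r.length = t.length + 1 := by
                have := congrArg List.length hr; simpa using this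
              have hdrop : t.drop 10 = r := by
                have hd : (pvK4 ++ r).drop 11 = r := List.drop_left' (by decide)
                rw [hr] at hd
                simpa [List.drop_succ_cons] using hd
              have hB : pvScan (c :: t) = pvV4 ++ pvScan r := by
                rw [pvScan]
                have hF : pvFirstRep (c :: t) = some (pvV4, 11) := by
                  rw [pvFirstRep,
                    if_neg (fun hb => h1 (List.isPrefixOf_iff_prefix.1 hb)),
                    if_neg (fun hb => h2 (List.isPrefixOf_iff_prefix.1 hb)),
                    if_neg (fun hb => h3 (List.isPrefixOf_iff_prefix.1 hb)),
                    if_pos (List.isPrefixOf_iff_prefix.2 ⟨r, hr⟩)]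
                rw [hF]
                simp [hdrop]
              rw [hB, chainA, ← hr]
              rw [rep1_skip pvK1 pvV1 pvK4 (by decide) (by decide)]
              rw [rep1_skip pvK2 pvV2 pvK4 (by decide) (by decide)]
              rw [rep1_skip pvK3 pvV3 pvK4 (by decide) (by decide)]
              rw [rep1_head pvK4 pvV4 (by decide)]
              rw [rep1_skip pvK5 pvV5 pvV4 (by decide) (by decide)]
              rw [rep1_skip pvK6 pvV6 pvV4 (by decide) (by decide)]
              rw [rep1_skip pvK7 pvV7 pvV4 (by decide) (by decide)]
              rw [ih r (by
                have hL : pvK4.length = 11 := by decide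
                have hc : (c :: t).length = t.length + 1 := by simp
                omega)]
              rfl
            ·
              by_cases h5 : pvK5 <+: (c :: t)
              · obtain ⟨r, hr⟩ := h5
                have hlen : pvK5.length + r.length = t.length + 1 := by
                  have := congrArg List.length hr; simpa using this
                have hdrop : t.drop 15 = r := by
                  have hd : (pvK5 ++ r).drop 16 = r := List.drop_left' (by decide)
                  rw [hr] at hd
                  simpa [List.drop_succ_cons] using hd
                have hB : pvScan (c :: t) = pvV5 ++ pvScan r := by
                  rw [pvScan]
                  have hF : pvFirstRep (c :: t) = some (pvV5, 16) := by
                    rw [pvFirstRep,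
                      if_neg (fun hb => h1 (List.isPrefixOf_iff_prefix.1 hb)),
                      if_neg (fun hb => h2 (List.isPrefixOf_iff_prefix.1 hb)),
                      if_neg (fun hb => h3 (List.isPrefixOf_iff_prefix.1 hb)),
                      if_neg (fun hb => h4 (List.isPrefixOf_iff_prefix.1 hb)),
                      if_pos (List.isPrefixOf_iff_prefix.2 ⟨r, hr⟩)]
                  rw [hF]
                  simp [hdrop]
                rw [hB, chainA, ← hr]
                rw [rep1_skip pvK1 pvV1 pvK5 (by decide) (by decide)]
                rw [rep1_skip pvK2 pvV2 pvK5 (by decide) (by decide)]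
                rw [rep1_skip pvK3 pvV3 pvK5 (by decide) (by decide)]
                rw [rep1_skip pvK4 pvV4 pvK5 (by decide) (by decide)]
                rw [rep1_head pvK5 pvV5 (by decide)]
                rw [rep1_skip pvK6 pvV6 pvV5 (by decide) (by decide)]
                rw [rep1_skip pvK7 pvV7 pvV5 (by decide) (by decide)]
                rw [ih r (by
                  have hL : pvK5.length = 16 := by decide
                  have hc : (c :: t).length = t.length + 1 := by simp
                  omega)]
                rfl
              ·
                by_cases h6 : pvK6 <+: (c :: t)
                · obtain ⟨r, hr⟩ := h6
                  have hlen : pvK6.length + r.length = t.length + 1 := by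
                    have := congrArg List.length hr; simpa using this
                  have hdrop : t.drop 11 = r := by
                    have hd : (pvK6 ++ r).drop 12 = r := List.drop_left' (by decide)
                    rw [hr] at hd
                    simpa [List.drop_succ_cons] using hd
                  have hB : pvScan (c :: t) = pvV6 ++ pvScan r := by
                    rw [pvScan]
                    have hF : pvFirstRep (c :: t) = some (pvV6, 12) := by
                      rw [pvFirstRep,
                        if_neg (fun hb => h1 (List.isPrefixOf_iff_prefix.1 hb)),
                        if_neg (fun hb => h2 (List.isPrefixOf_iff_prefix.1 hb)),
                        if_neg (fun hb => h3 (List.isPrefixOf_iff_prefix.1 hb)),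
                        if_neg (fun hb => h4 (List.isPrefixOf_iff_prefix.1 hb)),
                        if_neg (fun hb => h5 (List.isPrefixOf_iff_prefix.1 hb)),
                        if_pos (List.isPrefixOf_iff_prefix.2 ⟨r, hr⟩)]
                    rw [hF]
                    simp [hdrop]
                  rw [hB, chainA, ← hr]
                  rw [rep1_skip pvK1 pvV1 pvK6 (by decide) (by decide)]
                  rw [rep1_skip pvK2 pvV2 pvK6 (by decide) (by decide)]
                  rw [rep1_skip pvK3 pvV3 pvK6 (by decide) (by decide)]
                  rw [rep1_skip pvK4 pvV4 pvK6 (by decide) (by decide)]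
                  rw [rep1_skip pvK5 pvV5 pvK6 (by decide) (by decide)]
                  rw [rep1_head pvK6 pvV6 (by decide)]
                  rw [rep1_skip pvK7 pvV7 pvV6 (by decide) (by decide)]
                  rw [ih r (by
                    have hL : pvK6.length = 12 := by decide
                    have hc : (c :: t).length = t.length + 1 := by simp
                    omega)]
                  rfl
                ·
                  by_cases h7 : pvK7 <+: (c :: t)
                  · obtain ⟨r, hr⟩ := h7
                    have hlen : pvK7.length + r.length = t.length + 1 := by
                      have := congrArg List.length hr; simpa using this
                    have hdrop : t.drop 19 = r := by
                      have hd : (pvK7 ++ r).drop 20 = r := List.drop_left' (by decide)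
                      rw [hr] at hd
                      simpa [List.drop_succ_cons] using hd
                    have hB : pvScan (c :: t) = pvV7 ++ pvScan r := by
                      rw [pvScan]
                      have hF : pvFirstRep (c :: t) = some (pvV7, 20) := by
                        rw [pvFirstRep,
                          if_neg (fun hb => h1 (List.isPrefixOf_iff_prefix.1 hb)),
                          if_neg (fun hb => h2 (List.isPrefixOf_iff_prefix.1 hb)),
                          if_neg (fun hb => h3 (List.isPrefixOf_iff_prefix.1 hb)),
                          if_neg (fun hb => h4 (List.isPrefixOf_iff_prefix.1 hb)),
                          if_neg (fun hb => h5 (List.isPrefixOf_iff_prefix.1 hb)),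
                          if_neg (fun hb => h6 (List.isPrefixOf_iff_prefix.1 hb)),
                          if_pos (List.isPrefixOf_iff_prefix.2 ⟨r, hr⟩)]
                      rw [hF]
                      simp [hdrop]
                    rw [hB, chainA, ← hr]
                    rw [rep1_skip pvK1 pvV1 pvK7 (by decide) (by decide)]
                    rw [rep1_skip pvK2 pvV2 pvK7 (by decide) (by decide)]
                    rw [rep1_skip pvK3 pvV3 pvK7 (by decide) (by decide)]
                    rw [rep1_skip pvK4 pvV4 pvK7 (by decide) (by decide)]
                    rw [rep1_skip pvK5 pvV5 pvK7 (by decide) (by decide)]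
                    rw [rep1_skip pvK6 pvV6 pvK7 (by decide) (by decide)]
                    rw [rep1_head pvK7 pvV7 (by decide)]
                    rw [ih r (by
                      have hL : pvK7.length = 20 := by decide
                      have hc : (c :: t).length = t.length + 1 := by simp
                      omega)]
                    rfl
                  ·
                    have hB : pvScan (c :: t) = c :: pvScan t := by
                      rw [pvScan]
                      have hF : pvFirstRep (c :: t) = none := by
                        rw [pvFirstRep,
                          if_neg (fun hb => h1 (List.isPrefixOf_iff_prefix.1 hb)),
                          if_neg (fun hb => h2 (List.isPrefixOf_iff_prefix.1 hb)),
                          if_neg (fun hb => h3 (List.isPrefixOf_iff_prefix.1 hb)),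
                          if_neg (fun hb => h4 (List.isPrefixOf_iff_prefix.1 hb)),
                          if_neg (fun hb => h5 (List.isPrefixOf_iff_prefix.1 hb)),
                          if_neg (fun hb => h6 (List.isPrefixOf_iff_prefix.1 hb)),
                          if_neg (fun hb => h7 (List.isPrefixOf_iff_prefix.1 hb))]
                      rw [hF]
                    have n2 : ¬ pvK2 <+: c :: rep1 pvK1 pvV1 t :=
                      not_prefix_cons_rep1 pvK2 pvK1 pvV1 c (t) (by decide) (by decide) (by decide)
                        (h2)
                    have n3 : ¬ pvK3 <+: c :: rep1 pvK2 pvV2 (rep1 pvK1 pvV1 t) :=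
                      not_prefix_cons_rep1 pvK3 pvK2 pvV2 c (rep1 pvK1 pvV1 t) (by decide) (by decide) (by decide)
                        (not_prefix_cons_rep1 pvK3 pvK1 pvV1 c (t) (by decide) (by decide) (by decide)
                        (h3))
                    have n4 : ¬ pvK4 <+: c :: rep1 pvK3 pvV3 (rep1 pvK2 pvV2 (rep1 pvK1 pvV1 t)) :=
                      not_prefix_cons_rep1 pvK4 pvK3 pvV3 c (rep1 pvK2 pvV2 (rep1 pvK1 pvV1 t)) (by decide) (by decide) (by decide)
                        (not_prefix_cons_rep1 pvK4 pvK2 pvV2 c (rep1 pvK1 pvV1 t) (by decide) (by decide) (by decide)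
                        (not_prefix_cons_rep1 pvK4 pvK1 pvV1 c (t) (by decide) (by decide) (by decide)
                        (h4)))
                    have n5 : ¬ pvK5 <+: c :: rep1 pvK4 pvV4 (rep1 pvK3 pvV3 (rep1 pvK2 pvV2 (rep1 pvK1 pvV1 t))) :=
                      not_prefix_cons_rep1 pvK5 pvK4 pvV4 c (rep1 pvK3 pvV3 (rep1 pvK2 pvV2 (rep1 pvK1 pvV1 t))) (by decide) (by decide) (by decide)
                        (not_prefix_cons_rep1 pvK5 pvK3 pvV3 c (rep1 pvK2 pvV2 (rep1 pvK1 pvV1 t)) (by decide) (by decide) (by decide)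
                        (not_prefix_cons_rep1 pvK5 pvK2 pvV2 c (rep1 pvK1 pvV1 t) (by decide) (by decide) (by decide)
                        (not_prefix_cons_rep1 pvK5 pvK1 pvV1 c (t) (by decide) (by decide) (by decide)
                        (h5))))
                    have n6 : ¬ pvK6 <+: c :: rep1 pvK5 pvV5 (rep1 pvK4 pvV4 (rep1 pvK3 pvV3 (rep1 pvK2 pvV2 (rep1 pvK1 pvV1 t)))) :=
                      not_prefix_cons_rep1 pvK6 pvK5 pvV5 c (rep1 pvK4 pvV4 (rep1 pvK3 pvV3 (rep1 pvK2 pvV2 (rep1 pvK1 pvV1 t)))) (by decide) (by decide) (by decide)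
                        (not_prefix_cons_rep1 pvK6 pvK4 pvV4 c (rep1 pvK3 pvV3 (rep1 pvK2 pvV2 (rep1 pvK1 pvV1 t))) (by decide) (by decide) (by decide)
                        (not_prefix_cons_rep1 pvK6 pvK3 pvV3 c (rep1 pvK2 pvV2 (rep1 pvK1 pvV1 t)) (by decide) (by decide) (by decide)
                        (not_prefix_cons_rep1 pvK6 pvK2 pvV2 c (rep1 pvK1 pvV1 t) (by decide) (by decide) (by decide)
                        (not_prefix_cons_rep1 pvK6 pvK1 pvV1 c (t) (by decide) (by decide) (by decide)
                        (h6)))))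
                    have n7 : ¬ pvK7 <+: c :: rep1 pvK6 pvV6 (rep1 pvK5 pvV5 (rep1 pvK4 pvV4 (rep1 pvK3 pvV3 (rep1 pvK2 pvV2 (rep1 pvK1 pvV1 t))))) :=
                      not_prefix_cons_rep1 pvK7 pvK6 pvV6 c (rep1 pvK5 pvV5 (rep1 pvK4 pvV4 (rep1 pvK3 pvV3 (rep1 pvK2 pvV2 (rep1 pvK1 pvV1 t))))) (by decide) (by decide) (by decide)
                        (not_prefix_cons_rep1 pvK7 pvK5 pvV5 c (rep1 pvK4 pvV4 (rep1 pvK3 pvV3 (rep1 pvK2 pvV2 (rep1 pvK1 pvV1 t)))) (by decide) (by decide) (by decide)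
                        (not_prefix_cons_rep1 pvK7 pvK4 pvV4 c (rep1 pvK3 pvV3 (rep1 pvK2 pvV2 (rep1 pvK1 pvV1 t))) (by decide) (by decide) (by decide)
                        (not_prefix_cons_rep1 pvK7 pvK3 pvV3 c (rep1 pvK2 pvV2 (rep1 pvK1 pvV1 t)) (by decide) (by decide) (by decide)
                        (not_prefix_cons_rep1 pvK7 pvK2 pvV2 c (rep1 pvK1 pvV1 t) (by decide) (by decide) (by decide)
                        (not_prefix_cons_rep1 pvK7 pvK1 pvV1 c (t) (by decide) (by decide) (by decide)
                        (h7))))))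
                    rw [hB, chainA]
                    rw [rep1_cons_neg pvK1 pvV1 c t (by decide) h1]
                    rw [rep1_cons_neg pvK2 pvV2 c (rep1 pvK1 pvV1 t) (by decide) n2]
                    rw [rep1_cons_neg pvK3 pvV3 c (rep1 pvK2 pvV2 (rep1 pvK1 pvV1 t)) (by decide) n3]
                    rw [rep1_cons_neg pvK4 pvV4 c (rep1 pvK3 pvV3 (rep1 pvK2 pvV2 (rep1 pvK1 pvV1 t))) (by decide) n4]
                    rw [rep1_cons_neg pvK5 pvV5 c (rep1 pvK4 pvV4 (rep1 pvK3 pvV3 (rep1 pvK2 pvV2 (rep1 pvK1 pvV1 t)))) (by decide) n5]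
                    rw [rep1_cons_neg pvK6 pvV6 c (rep1 pvK5 pvV5 (rep1 pvK4 pvV4 (rep1 pvK3 pvV3 (rep1 pvK2 pvV2 (rep1 pvK1 pvV1 t))))) (by decide) n6]
                    rw [rep1_cons_neg pvK7 pvV7 c (rep1 pvK6 pvV6 (rep1 pvK5 pvV5 (rep1 pvK4 pvV4 (rep1 pvK3 pvV3 (rep1 pvK2 pvV2 (rep1 pvK1 pvV1 t)))))) (by decide) n7]
                    rw [ih t (by
                      have hc : (c :: t).length = t.length + 1 := by simp
                      omega)]
                    rfl

-- final bridge to strings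
theorem remove_component_names_eq (content : String) :
    remove_component_names content = remove_component_names_alt content := by
  rw [remove_component_names, remove_component_names_alt]
  simp only [pvPairs, List.foldl]
  apply String.toList_inj.mp
  simp only [PySem.Str.toList_replace, String.toList_ofList]
  rw [replace_eq_rep1 "TenantInfo".toList "租户信息".toList (by decide),
    replace_eq_rep1 "MemberStats".toList "成员统计".toList (by decide),
    replace_eq_rep1 "MembersTable".toList "成员列表".toList (by decide),
    replace_eq_rep1 "TenantQuota".toList "租户配额".toList (by decide),
    replace_eq_rep1 "TenantWorkspaces".toList "工作空间列表".toList (by decide),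
    replace_eq_rep1 "TenantEvents".toList "操作日志".toList (by decide),
    replace_eq_rep1 "UploadAvatarWithCrop".toList "上传并裁剪头像".toList (by decide)]
  rw [scan_eq_chain content.toList.length content.toList le_rfl]
  rfl

-- ===== VERDICT (by name: the statement is the Claim_ definition above) =====
theorem remove_component_names_spec : Claim_equal_remove_component_names := by
  intro content _
  unfold Spec_remove_component_names
  exact remove_component_names_eq content
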